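-- pv_equiv track=rewrite | github.com/AlbertD3V/POO_Python | baridev copy.py | solution
-- ===== SOURCE A (Python) =====
-- def solution(n, actions):
--     state_transitions = {
--         'A': {'event1': 'B', 'event2': 'C'},
--         'B': {'event1': 'C', 'event2': 'D'},
--         'C': {'event1': 'D', 'event2': 'A'},
--         'D': {'event1': 'A', 'event2': 'B'}
--     }
--
--     current_state = 'A'
--     result = []
--
--     for action in actions:
--         if current_state not in state_transitions:
--             return "ERROR"
--
--         if action not in state_transitions[current_state]:
--             return "ERROR"
--
--         new_state = state_transitions[current_state][action]
--         result.append(new_state)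
--         current_state = new_state
--
--     return ", ".join(result)
-- ===== SOURCE B (Python) =====
-- def solution(n, actions):
--     # Stage 1: validate the whole command list up front.
--     if any(a != 'event1' and a != 'event2' for a in actions):
--         return "ERROR"
--     # Stage 2: map each action to its step weight.
--     steps = [1 if a == 'event1' else 2 for a in actions]
--     # Stage 3: raw (unreduced) prefix sums of the weights.
--     prefixes = []
--     s = 0
--     for d in steps:
--         s += d
--         prefixes.append(s)
--     # Stage 4: reduce mod 4 only when mapping each prefix sum to its letter.
--     return ", ".join("ABCD"[p % 4] for p in prefixes)
-- ===== Notes on version B (the rewrite author's own statement) =====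
-- stated objective: alternative
-- what changed: Replaces A's single pass over a nested transition dict with early returns by staged passes: validate all actions first, map actions to step weights 1/2, take raw (unreduced) prefix sums, and only at the end reduce each sum mod 4 to index the letter string 'ABCD'.
import Mathlib
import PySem

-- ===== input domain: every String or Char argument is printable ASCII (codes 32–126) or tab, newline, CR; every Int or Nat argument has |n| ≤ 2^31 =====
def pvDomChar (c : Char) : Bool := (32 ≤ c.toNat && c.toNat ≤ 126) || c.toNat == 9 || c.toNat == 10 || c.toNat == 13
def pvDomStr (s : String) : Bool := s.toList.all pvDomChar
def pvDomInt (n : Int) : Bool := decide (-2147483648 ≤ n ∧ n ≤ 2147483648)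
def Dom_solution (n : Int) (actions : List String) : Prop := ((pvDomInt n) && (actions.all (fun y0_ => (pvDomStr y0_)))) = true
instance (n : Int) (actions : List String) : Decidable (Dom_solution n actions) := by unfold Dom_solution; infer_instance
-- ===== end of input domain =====

-- B replaces A's one-pass dict-driven state machine with staged passes: validate, map to weights, raw prefix sums, mod-4 letter mapping at the end (alternative decomposition; same cost).

-- ===== PORT A =====
-- the literal nested dict of A
def pvTransitions : PySem.Dict String (PySem.Dict String String) :=
  ((((PySem.Dict.empty).insert "A" (((PySem.Dict.empty).insert "event1" "B").insert "event2" "C")).insert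
      "B" (((PySem.Dict.empty).insert "event1" "C").insert "event2" "D")).insert
      "C" (((PySem.Dict.empty).insert "event1" "D").insert "event2" "A")).insert
      "D" (((PySem.Dict.empty).insert "event1" "A").insert "event2" "B")

-- the for-loop of A with its early "ERROR" returns
def solutionLoop : List String → String → List String → String
  | [], _, result => PySem.Str.join ", " result
  | action :: rest, current, result =>
    match pvTransitions.get? current with
    | none => "ERROR"
    | some m =>
      match m.get? action with
      | none => "ERROR"
      | some newState => solutionLoop rest newState (result ++ [newState])

def solution (n : Int) (actions : List String) : String :=
  solutionLoop actions "A" []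

-- ===== PORT B =====
-- "ABCD"[p % 4]; the index is always in range so the default is unreachable
def pvLetter (idx : Nat) : String := ((PySem.Str.pyGet? "ABCD" (idx : Int)).map (fun c => String.ofList [c])).getD ""

def solution_alt (n : Int) (actions : List String) : String :=
  if actions.any (fun a => a != "event1" && a != "event2") then "ERROR"
  else
    let steps := actions.map (fun a => if a == "event1" then (1 : Nat) else 2)
    let prefixes := (steps.foldl (fun (p : List Nat × Nat) d => (p.1 ++ [p.2 + d], p.2 + d)) (([] : List Nat), 0)).1
    PySem.Str.join ", " (prefixes.map (fun p => pvLetter (p % 4)))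

-- ===== PRECONDITION & SPEC =====
def Spec_solution (n : Int) (actions : List String) (out : String) : Prop := out = solution_alt n actions
instance (n : Int) (actions : List String) (out : String) : Decidable (Spec_solution n actions out) := by unfold Spec_solution; infer_instance

-- ===== CLAIM (what is proved, stated in full; the proofs are below) =====
def Claim_equal_solution : Prop := ∀ (n : Int) (actions : List String), Dom_solution n actions → Spec_solution n actions (solution n actions)

-- ===== LEMMAS AND PROOFS =====

-- recursive form of B's prefix-sum loop
def prefRec (s : Nat) : List Nat → List Nat
  | [] => []
  | d :: rest => (s + d) :: prefRec (s + d) rest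

lemma pref_foldl : ∀ (l out : List Nat) (s : Nat),
    (l.foldl (fun (p : List Nat × Nat) d => (p.1 ++ [p.2 + d], p.2 + d)) (out, s)).1 = out ++ prefRec s l := by
  intro l
  induction l with
  | nil => intro out s; simp [prefRec]
  | cons d rest ih => intro out s; simp [List.foldl, prefRec, ih (out ++ [s + d]) (s + d)]

-- loop invariant: A's current state is the letter of B's running sum mod 4
lemma loop_eq : ∀ (acts : List String) (s : Nat) (out : List String),
    solutionLoop acts (pvLetter (s % 4)) out =
      if acts.any (fun a => a != "event1" && a != "event2") then "ERROR"
      else PySem.Str.join ", "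
        (out ++ (prefRec s (acts.map (fun a => if a == "event1" then (1 : Nat) else 2))).map (fun p => pvLetter (p % 4))) := by
  intro acts
  induction acts with
  | nil => intro s out; simp [solutionLoop, prefRec]
  | cons a rest ih =>
    intro s out
    have h4 : s % 4 = 0 ∨ s % 4 = 1 ∨ s % 4 = 2 ∨ s % 4 = 3 := by omega
    by_cases h1 : a = "event1"
    · subst h1
      have h1' : (s + 1) % 4 = (s % 4 + 1) % 4 := by omega
      rcases h4 with hr | hr | hr | hr <;>
        · rw [show solutionLoop ("event1" :: rest) (pvLetter (s % 4)) out
              = solutionLoop rest (pvLetter ((s + 1) % 4)) (out ++ [pvLetter ((s + 1) % 4)]) by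
            simp [hr, h1', solutionLoop, pvTransitions, PySem.Dict.get?, PySem.Dict.insert,
              PySem.Dict.empty, pvLetter, PySem.Str.pyGet?]] <;>
          simp [ih (s + 1) (out ++ [pvLetter ((s + 1) % 4)]), prefRec]
    · by_cases h2 : a = "event2"
      · subst h2
        have h2' : (s + 2) % 4 = (s % 4 + 2) % 4 := by omega
        rcases h4 with hr | hr | hr | hr <;>
          · rw [show solutionLoop ("event2" :: rest) (pvLetter (s % 4)) out
                = solutionLoop rest (pvLetter ((s + 2) % 4)) (out ++ [pvLetter ((s + 2) % 4)]) by
              simp [hr, h2', solutionLoop, pvTransitions, PySem.Dict.get?, PySem.Dict.insert,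
                PySem.Dict.empty, pvLetter, PySem.Str.pyGet?]] <;>
            simp [ih (s + 2) (out ++ [pvLetter ((s + 2) % 4)]), prefRec, h1]
      · rcases h4 with hr | hr | hr | hr <;>
          simp [hr, solutionLoop, pvTransitions, PySem.Dict.get?, PySem.Dict.insert,
            PySem.Dict.empty, pvLetter, PySem.Str.pyGet?, h1, h2, Ne.symm h1, Ne.symm h2]

-- ===== VERDICT (by name: the statement is the Claim_ definition above) =====
theorem solution_spec : Claim_equal_solution := by
  intro n actions _
  show solution n actions = solution_alt n actions
  have h := loop_eq actions 0 []
  simp only [solution, solution_alt, pref_foldl]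
  simpa [pvLetter] using h
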